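-- pv_equiv track=rewrite | github.com/averykhoo/thue-morse | n_ary_expansion.py | n_ary
-- ===== SOURCE A (Python) =====
-- def n_ary(number, n):
--     assert n >= 1 and isinstance(n, int)
--     if n == 1:
--         return [0] * number
--
--     nums = []
--     while number:
--         number, r = divmod(number, n)
--         nums.append(r)
--     return nums[::-1]
-- ===== SOURCE B (Python) =====
-- def n_ary(number, n):
--     assert n >= 1 and isinstance(n, int)
--     if n == 1:
--         return [0] * number
--
--     powers = []
--     p = 1
--     while p <= number:
--         powers.append(p)
--         p *= n
--
--     digits = []
--     for p in reversed(powers):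
--         digits.append(number // p)
--         number %= p
--     return digits
-- ===== Notes on version B (the rewrite author's own statement) =====
-- stated objective: alternative
-- what changed: B first builds the ascending list of powers of n not exceeding the number, then extracts digits most-significant-first by dividing and reducing modulo each power in descending order, instead of A's least-significant-first divmod loop followed by a reversal.
import Mathlib
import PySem

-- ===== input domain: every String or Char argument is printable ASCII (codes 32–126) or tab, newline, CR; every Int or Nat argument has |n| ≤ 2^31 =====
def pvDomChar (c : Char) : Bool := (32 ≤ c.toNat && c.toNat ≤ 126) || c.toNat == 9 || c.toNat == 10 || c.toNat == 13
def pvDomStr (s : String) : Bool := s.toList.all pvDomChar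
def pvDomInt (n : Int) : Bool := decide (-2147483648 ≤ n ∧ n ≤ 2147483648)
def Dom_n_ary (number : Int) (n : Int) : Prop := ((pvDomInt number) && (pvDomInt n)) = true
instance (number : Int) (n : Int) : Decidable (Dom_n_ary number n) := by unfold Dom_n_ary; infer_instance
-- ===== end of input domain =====

-- B builds the powers of n up to the number, then extracts digits most-significant-first
-- by division and reduction modulo each power in descending order (alternative algorithm).
-- ===== PORT A =====
-- while number: number, r = divmod(number, n); nums.append(r) — fuel makes the loop total; natAbs+1 steps suffice on Pre_.
def n_ary_loop (fuel : Nat) (number : Int) (n : Int) (nums : List Int) : List Int :=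
  match fuel with
  | 0 => nums
  | fuel + 1 =>
    if number = 0 then nums
    else n_ary_loop fuel (PySem.Int.floordiv number n) n (nums ++ [PySem.Int.mod number n])

def n_ary (number : Int) (n : Int) : List Int :=
  if n = 1 then List.replicate number.toNat 0   -- [0] * number (empty for negative number)
  else (n_ary_loop (number.natAbs + 1) number n []).reverse   -- nums[::-1]

-- ===== PORT B =====
-- while p <= number: powers.append(p); p *= n — fuel makes the loop total; natAbs+1 steps suffice on Pre_.
def n_ary_powLoop (fuel : Nat) (p : Int) (number : Int) (n : Int) (powers : List Int) : List Int :=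
  match fuel with
  | 0 => powers
  | fuel + 1 =>
    if p ≤ number then n_ary_powLoop fuel (p * n) number n (powers ++ [p])
    else powers

-- for p in reversed(powers): digits.append(number // p); number %= p
def n_ary_extLoop (ps : List Int) (number : Int) (digits : List Int) : List Int :=
  match ps with
  | [] => digits
  | p :: rest =>
    n_ary_extLoop rest (PySem.Int.mod number p) (digits ++ [PySem.Int.floordiv number p])

def n_ary_alt (number : Int) (n : Int) : List Int :=
  if n = 1 then List.replicate number.toNat 0
  else n_ary_extLoop (n_ary_powLoop (number.natAbs + 1) 1 number n []).reverse number []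

-- ===== PRECONDITION & SPEC =====
-- A raises AssertionError for n < 1 and loops forever for n >= 2 with negative number; Pre_ is exactly where A returns.
def Pre_n_ary (number : Int) (n : Int) : Prop := n = 1 ∨ (2 ≤ n ∧ 0 ≤ number)
instance (number : Int) (n : Int) : Decidable (Pre_n_ary number n) := by unfold Pre_n_ary; infer_instance
def pvWitness_n_ary : Int × Int := (10, 2)
def Spec_n_ary (number : Int) (n : Int) (out : List Int) : Prop := out = n_ary_alt number n
instance (number : Int) (n : Int) (out : List Int) : Decidable (Spec_n_ary number n out) := by unfold Spec_n_ary; infer_instance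

-- ===== CLAIM (what is proved, stated in full; the proofs are below) =====
def Claim_equal_n_ary : Prop := ∀ (number : Int) (n : Int), Dom_n_ary number n → Pre_n_ary number n → Spec_n_ary number n (n_ary number n)

-- ===== LEMMAS AND PROOFS =====

-- reference: canonical digit list (most significant first), by well-founded recursion
def canonDigits (m n : Int) : List Int :=
  if h : 0 < m ∧ 2 ≤ n then canonDigits (m / n) n ++ [m % n] else []
termination_by m.toNat
decreasing_by
  have h1 : 0 ≤ m / n := Int.ediv_nonneg (le_of_lt h.1) (by omega)
  have h2 : m / n < m := by
    rw [Int.ediv_lt_iff_lt_mul (by omega : (0:Int) < n)]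
    nlinarith [h.1, h.2]
  omega

-- ideal powers list [p, p*n, p*n^2, ...] while ≤ m
def idealPows (p m n : Int) : List Int :=
  if h : 1 ≤ p ∧ 2 ≤ n ∧ p ≤ m then p :: idealPows (p * n) m n else []
termination_by (m + 1 - p).toNat
decreasing_by
  have : p + p ≤ p * n := by nlinarith [h.1, h.2.1]
  omega

def ascList (n p : Int) : Nat → List Int
  | 0 => [p]
  | k + 1 => p :: ascList n (p * n) k

def descList (n : Int) : Nat → List Int
  | 0 => [1]
  | k + 1 => n ^ (k + 1) :: descList n k

def padCanon (n : Int) (j : Nat) (m : Int) : List Int :=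
  List.replicate (j - (canonDigits m n).length) 0 ++ canonDigits m n

lemma canon_zero (n : Int) : canonDigits 0 n = [] := by
  rw [canonDigits]; simp

lemma canon_pos {m n : Int} (hpos : 0 < m) (hn : 2 ≤ n) :
    canonDigits m n = canonDigits (m / n) n ++ [m % n] := by
  rw [canonDigits]; exact dif_pos ⟨hpos, hn⟩

lemma ideal_pos {p m n : Int} (hp : 1 ≤ p) (hn : 2 ≤ n) (hle : p ≤ m) :
    idealPows p m n = p :: idealPows (p * n) m n := by
  rw [idealPows]; exact dif_pos ⟨hp, hn, hle⟩

lemma fd_nonneg {a n : Int} (ha : 0 ≤ a) (hn : 2 ≤ n) : 0 ≤ PySem.Int.floordiv a n := by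
  rw [PySem.Int.floordiv_eq_ediv_of_pos (by omega)]
  exact Int.ediv_nonneg ha (by omega)

lemma fd_lt {a n : Int} (ha : 0 < a) (hn : 2 ≤ n) : PySem.Int.floordiv a n < a := by
  rw [PySem.Int.floordiv_lt_iff_lt_mul (by omega)]
  nlinarith

-- A's loop computes the reversed canonical digits
lemma loop_eq_canon (fuel : Nat) : ∀ (number n : Int) (nums : List Int),
    0 ≤ number → 2 ≤ n → number.toNat < fuel →
    n_ary_loop fuel number n nums = nums ++ (canonDigits number n).reverse := by
  induction fuel with
  | zero => intro number n nums _ _ h; omega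
  | succ f ih =>
    intro number n nums h0 hn hf
    by_cases hz : number = 0
    · rw [hz, canon_zero]
      simp [n_ary_loop]
    · have hpos : 0 < number := lt_of_le_of_ne h0 (Ne.symm hz)
      have h1 : 0 ≤ PySem.Int.floordiv number n := fd_nonneg h0 hn
      have h2 : PySem.Int.floordiv number n < number := fd_lt hpos hn
      have h3 : (PySem.Int.floordiv number n).toNat < f := by omega
      simp only [n_ary_loop, hz, if_false]
      rw [ih _ _ _ h1 hn h3,
          PySem.Int.floordiv_eq_ediv_of_pos (show (0:Int) < n by omega),
          PySem.Int.mod_eq_emod_of_pos (show (0:Int) < n by omega),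
          canon_pos hpos hn]
      simp

-- B's power loop computes the ideal powers list, given enough fuel
lemma powLoop_eq_ideal (fuel : Nat) : ∀ (p m n : Int) (acc : List Int),
    1 ≤ p → 2 ≤ n → (m + 1 - p).toNat < fuel →
    n_ary_powLoop fuel p m n acc = acc ++ idealPows p m n := by
  induction fuel with
  | zero => intro p m n acc _ _ h; omega
  | succ f ih =>
    intro p m n acc hp hn hf
    by_cases hle : p ≤ m
    · have h2p : p + p ≤ p * n := by nlinarith
      have h1 : 1 ≤ p * n := by nlinarith
      have h3 : (m + 1 - p * n).toNat < f := by omega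
      simp only [n_ary_powLoop, hle, if_true]
      rw [ih _ _ _ _ h1 hn h3, ideal_pos hp hn hle]
      simp
    · simp only [n_ary_powLoop, hle, if_false]
      rw [idealPows, dif_neg (by tauto)]
      simp

-- idealPows in the bracket p*n^k ≤ m < p*n^(k+1) is the ascending list of length k+1
lemma ideal_eq_asc (k : Nat) : ∀ (p m n : Int), 1 ≤ p → 2 ≤ n →
    p * n ^ k ≤ m → m < p * n ^ (k + 1) →
    idealPows p m n = ascList n p k := by
  induction k with
  | zero =>
    intro p m n hp hn hlo hhi
    rw [pow_zero, mul_one] at hlo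
    rw [pow_one] at hhi
    rw [idealPows, dif_pos ⟨hp, hn, hlo⟩, idealPows,
        dif_neg (by rintro ⟨_, _, h⟩; omega)]
    rfl
  | succ k ih =>
    intro p m n hp hn hlo hhi
    have h1 : (1:Int) ≤ n ^ (k + 1) := one_le_pow₀ (by omega)
    have hle : p ≤ m := le_trans (le_mul_of_one_le_right (by omega) h1) hlo
    have hpn : 1 ≤ p * n := by nlinarith
    have hlo2 : (p * n) * n ^ k ≤ m := by
      rw [mul_assoc, mul_comm n (n ^ k), ← pow_succ]; exact hlo
    have hhi2 : m < (p * n) * n ^ (k + 1) := by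
      rw [mul_assoc, mul_comm n (n ^ (k + 1)), ← pow_succ]; exact hhi
    rw [ideal_pos hp hn hle, ih _ _ _ hpn hn hlo2 hhi2]
    rfl

-- descList (k+1) = map (·*n) (descList k) ++ [1]
lemma descList_succ_map (n : Int) (k : Nat) :
    (descList n k).map (fun x => x * n) ++ [1] = descList n (k + 1) := by
  induction k with
  | zero => simp [descList]
  | succ k ih =>
    show (n ^ (k + 1) * n) :: ((descList n k).map (fun x => x * n) ++ [1]) = descList n (k + 2)
    rw [ih]
    show (n ^ (k + 1) * n) :: descList n (k + 1) = n ^ (k + 2) :: descList n (k + 1)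
    rw [← pow_succ]

lemma asc_reverse (k : Nat) : ∀ (n p : Int),
    (ascList n p k).reverse = (descList n k).map (fun x => x * p) := by
  induction k with
  | zero => intro n p; simp [ascList, descList]
  | succ k ih =>
    intro n p
    rw [show ascList n p (k + 1) = p :: ascList n (p * n) k from rfl,
        List.reverse_cons, ih]
    have hc : (fun x => x * (p * n)) = (fun x : Int => x * p) ∘ (fun x : Int => x * n) := by
      funext x; simp [Function.comp]; ring
    have h1 : [p] = List.map (fun x => x * p) [1] := by simp
    rw [hc, ← List.map_map, h1, ← List.map_append, descList_succ_map]

-- arithmetic identities for ediv/emod with positive factors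
lemma ediv_ediv_pow {m n : Int} (k : Nat) (hn : 2 ≤ n) : m / n / n ^ k = m / n ^ (k + 1) := by
  rw [Int.ediv_ediv_of_nonneg (by omega : (0:Int) ≤ n), ← pow_succ']

lemma emod_pow_emod {m n : Int} (k : Nat) : (m % n ^ (k + 1)) % n = m % n :=
  Int.emod_emod_of_dvd m (dvd_pow_self n (Nat.succ_ne_zero k))

lemma emod_pow_ediv {m n : Int} (k : Nat) (hn : 2 ≤ n) :
    (m % n ^ (k + 1)) / n = (m / n) % n ^ k := by
  have hnz : n ≠ 0 := by omega
  conv_lhs => rw [Int.emod_def, pow_succ, mul_comm (n ^ k) n]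
  have h : m - n * n ^ k * (m / (n * n ^ k)) = m + (-(n ^ k * (m / (n * n ^ k)))) * n := by ring
  rw [h, Int.add_mul_ediv_right _ _ hnz, Int.emod_def]
  have h2 : m / (n * n ^ k) = m / n / n ^ k := (Int.ediv_ediv_of_nonneg (by omega : (0:Int) ≤ n)).symm
  rw [h2]; ring

-- padded canonical digits satisfy the MSB-extraction recursion
lemma padCanon_step (k : Nat) : ∀ (m n : Int), 0 ≤ m → 2 ≤ n → m < n ^ (k + 1) →
    padCanon n (k + 1) m = (m / n ^ k) :: padCanon n k (m % n ^ k) := by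
  induction k with
  | zero =>
    intro m n h0 hn hm
    have hm1 : m < n := by simpa using hm
    rcases eq_or_lt_of_le h0 with h | h
    · rw [← h]; simp [padCanon, canon_zero]
    · rw [padCanon, padCanon, pow_zero, Int.emod_one, canon_zero, canon_pos h hn,
          Int.ediv_eq_zero_of_lt h0 hm1, canon_zero, Int.emod_eq_of_lt h0 hm1]
      simp
  | succ k ih =>
    intro m n h0 hn hm
    have hnpos : (0:Int) < n := by omega
    have hnk1 : (0:Int) < n ^ (k + 1) := by positivity
    rcases eq_or_lt_of_le h0 with h | hpos
    · rw [← h]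
      simp [padCanon, canon_zero, List.replicate_succ]
    · have hm2 : m / n < n ^ (k + 1) := by
        rw [Int.ediv_lt_iff_lt_mul hnpos]
        calc m < n ^ (k + 2) := hm
        _ = n ^ (k + 1) * n := by ring
      have h02 : 0 ≤ m / n := Int.ediv_nonneg h0 (le_of_lt hnpos)
      have ihm := ih (m / n) n h02 hn hm2
      have hlen : padCanon n (k + 2) m = padCanon n (k + 1) (m / n) ++ [m % n] := by
        rw [padCanon, padCanon, canon_pos hpos hn]
        have e : (canonDigits (m / n) n ++ [m % n]).length
            = (canonDigits (m / n) n).length + 1 := by simp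
        rw [e, show k + 2 - ((canonDigits (m / n) n).length + 1)
            = k + 1 - (canonDigits (m / n) n).length from by omega]
        simp
      rw [hlen, ihm, ediv_ediv_pow k hn]
      set r := m % n ^ (k + 1) with hr
      have hr0 : 0 ≤ r := Int.emod_nonneg m (by positivity)
      have hrn : r % n = m % n := emod_pow_emod k
      have hrd : r / n = (m / n) % n ^ k := emod_pow_ediv k hn
      rcases eq_or_lt_of_le hr0 with hz | hrpos
      · have h1 : (m / n) % n ^ k = 0 := by rw [← hrd, ← hz]; simp
        have h2 : m % n = 0 := by rw [← hrn, ← hz]; simp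
        rw [h1, h2, ← hz]
        simp [padCanon, canon_zero, List.replicate_succ']
      · have hcr : canonDigits r n = canonDigits (r / n) n ++ [r % n] :=
          canon_pos hrpos hn
        rw [padCanon, padCanon, hcr, hrd, hrn]
        have e : (canonDigits ((m / n) % n ^ k) n ++ [m % n]).length
            = (canonDigits ((m / n) % n ^ k) n).length + 1 := by simp
        rw [e, show k + 1 - ((canonDigits ((m / n) % n ^ k) n).length + 1)
            = k - (canonDigits ((m / n) % n ^ k) n).length from by omega]
        simp

-- B's extraction loop over the descending powers yields the padded canonical digits
lemma extLoop_desc (k : Nat) : ∀ (m n : Int) (acc : List Int), 0 ≤ m → 2 ≤ n → m < n ^ (k + 1) →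
    n_ary_extLoop (descList n k) m acc = acc ++ padCanon n (k + 1) m := by
  induction k with
  | zero =>
    intro m n acc h0 hn hm
    have hm1 : m < n := by simpa using hm
    have hfd : PySem.Int.floordiv m 1 = m := by
      rw [PySem.Int.floordiv_eq_ediv_of_pos (by omega)]; exact Int.ediv_one m
    show n_ary_extLoop [] (PySem.Int.mod m 1) (acc ++ [PySem.Int.floordiv m 1])
        = acc ++ padCanon n 1 m
    rw [n_ary_extLoop, hfd]
    congr 1
    rcases eq_or_lt_of_le h0 with h | h
    · rw [← h]; simp [padCanon, canon_zero]
    · rw [padCanon, canon_pos h hn, Int.ediv_eq_zero_of_lt h0 hm1, canon_zero,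
          Int.emod_eq_of_lt h0 hm1]
      simp
  | succ k ih =>
    intro m n acc h0 hn hm
    have hnk1 : (0:Int) < n ^ (k + 1) := by positivity
    have hfd : PySem.Int.floordiv m (n ^ (k + 1)) = m / n ^ (k + 1) :=
      PySem.Int.floordiv_eq_ediv_of_pos hnk1
    have hmd : PySem.Int.mod m (n ^ (k + 1)) = m % n ^ (k + 1) :=
      PySem.Int.mod_eq_emod_of_pos hnk1
    show n_ary_extLoop (descList n k) (PySem.Int.mod m (n ^ (k + 1)))
        (acc ++ [PySem.Int.floordiv m (n ^ (k + 1))]) = acc ++ padCanon n (k + 2) m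
    rw [hfd, hmd,
        ih (m % n ^ (k + 1)) n _ (Int.emod_nonneg m (by positivity)) hn
          (Int.emod_lt_of_pos m hnk1),
        padCanon_step (k + 1) m n h0 hn hm]
    simp

-- canonical digits of m with n^k ≤ m < n^(k+1) have length exactly k+1
lemma canon_len (k : Nat) : ∀ (m n : Int), 2 ≤ n → n ^ k ≤ m → m < n ^ (k + 1) →
    (canonDigits m n).length = k + 1 := by
  induction k with
  | zero =>
    intro m n hn hlo hhi
    have hlo1 : (1:Int) ≤ m := by simpa using hlo
    have hhi1 : m < n := by simpa using hhi
    rw [canon_pos (by omega) hn, Int.ediv_eq_zero_of_lt (by omega) hhi1, canon_zero]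
    simp
  | succ k ih =>
    intro m n hn hlo hhi
    have hnpos : (0:Int) < n := by omega
    have h1 : (1:Int) ≤ n ^ (k + 1) := one_le_pow₀ (by omega)
    have hpos : (0:Int) < m := by omega
    have hlo2 : n ^ k ≤ m / n := by
      rw [Int.le_ediv_iff_mul_le hnpos, mul_comm, ← pow_succ']
      exact hlo
    have hhi2 : m / n < n ^ (k + 1) := by
      rw [Int.ediv_lt_iff_lt_mul hnpos]
      calc m < n ^ (k + 2) := hhi
      _ = n ^ (k + 1) * n := by ring
    rw [canon_pos hpos hn]
    simp [ih (m / n) n hn hlo2 hhi2]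

-- existence of the power bracket for m ≥ 1
lemma exists_bracket {m n : Int} (hm : 1 ≤ m) (hn : 2 ≤ n) :
    ∃ k : Nat, n ^ k ≤ m ∧ m < n ^ (k + 1) := by
  have hm2 : m = (m.toNat : Int) := (Int.toNat_of_nonneg (by omega)).symm
  have hn2 : n = (n.toNat : Int) := (Int.toNat_of_nonneg (by omega)).symm
  have ha : m.toNat ≠ 0 := by omega
  have hb : 1 < n.toNat := by omega
  refine ⟨Nat.log n.toNat m.toNat, ?_, ?_⟩
  · rw [hm2, hn2]
    exact_mod_cast Nat.pow_log_le_self n.toNat ha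
  · rw [hm2, hn2]
    exact_mod_cast Nat.lt_pow_succ_log_self hb m.toNat

-- ===== VERDICT (by name: the statement is the Claim_ definition above) =====
theorem n_ary_spec : Claim_equal_n_ary := by
  intro number n _ hpre
  unfold Spec_n_ary n_ary n_ary_alt
  rcases hpre with h1 | ⟨hn, h0⟩
  · simp [h1]
  · have hne : n ≠ 1 := by omega
    have hA := loop_eq_canon (number.natAbs + 1) number n [] h0 hn (by omega)
    have hB := powLoop_eq_ideal (number.natAbs + 1) 1 number n [] (le_refl 1) hn (by omega)
    rw [if_neg hne, if_neg hne, hA, hB]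
    simp only [List.nil_append, List.reverse_reverse]
    rcases eq_or_lt_of_le h0 with hz | hpos
    · rw [← hz, canon_zero, idealPows, dif_neg (by rintro ⟨_, _, h⟩; omega)]
      simp [n_ary_extLoop]
    · obtain ⟨k, hlo, hhi⟩ := exists_bracket (show (1:Int) ≤ number by omega) hn
      rw [ideal_eq_asc k 1 number n (by omega) hn (by simpa using hlo) (by simpa using hhi),
          asc_reverse k n 1]
      rw [show (descList n k).map (fun x => x * 1) = descList n k from by simp,
          extLoop_desc k number n [] h0 hn hhi, padCanon, canon_len k number n hn hlo hhi]
      simp
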